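-- pv_equiv track=rewrite | github.com/gabogara/python_session_1_2 | class1.py | up_and_down
-- ===== SOURCE A (Python) =====
-- def up_and_down(lst):
--     par = 0
--     impar = 0
--     for i in range(len(lst)):
--         if lst[i] % 2 == 0:
--             par += 1
--         else:
--             impar += 1
--     return impar - par
-- ===== SOURCE B (Python) =====
-- def up_and_down(lst):
--     odds = [x for x in lst if x % 2 != 0]
--     evens = [x for x in lst if x % 2 == 0]
--     return len(odds) - len(evens)
-- ===== Notes on version B (the rewrite author's own statement) =====
-- stated objective: alternative
-- what changed: B replaces A's single index-based loop maintaining two running counters with two staged filter passes that materialise the odd and even sublists and subtract their lengths.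
import Mathlib
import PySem

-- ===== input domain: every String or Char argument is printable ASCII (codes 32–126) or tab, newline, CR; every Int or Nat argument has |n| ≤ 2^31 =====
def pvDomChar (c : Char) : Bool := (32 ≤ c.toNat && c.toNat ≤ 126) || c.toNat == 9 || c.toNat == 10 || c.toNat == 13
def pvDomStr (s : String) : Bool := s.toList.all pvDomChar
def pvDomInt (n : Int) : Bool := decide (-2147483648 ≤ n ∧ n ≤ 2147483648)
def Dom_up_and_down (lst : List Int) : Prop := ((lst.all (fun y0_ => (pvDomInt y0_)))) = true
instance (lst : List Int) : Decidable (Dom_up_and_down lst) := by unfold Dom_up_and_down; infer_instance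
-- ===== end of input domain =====

-- B builds the odd and even sublists in two staged filter passes and subtracts their lengths,
-- instead of A's single index loop with two running counters; objective: alternative (same O(n) cost).

-- ===== PORT A =====
-- for i in range(len(lst)) with state (par, impar); lst[i] is in range, so pyGetD is exact here
def up_and_down (lst : List Int) : Int :=
  let st := (PySem.List.pyRange 0 (lst.length : Int) 1).foldl
    (fun (pi : Int × Int) i =>
      if PySem.Int.mod (PySem.List.pyGetD lst i 0) 2 = 0 then (pi.1 + 1, pi.2)
      else (pi.1, pi.2 + 1))
    (0, 0)
  st.2 - st.1

-- ===== PORT B =====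
def up_and_down_alt (lst : List Int) : Int :=
  let odds := lst.filter (fun x => PySem.Int.mod x 2 ≠ 0)
  let evens := lst.filter (fun x => PySem.Int.mod x 2 = 0)
  (odds.length : Int) - (evens.length : Int)

-- ===== PRECONDITION & SPEC =====
def Spec_up_and_down (lst : List Int) (out : Int) : Prop := out = up_and_down_alt lst
instance (lst : List Int) (out : Int) : Decidable (Spec_up_and_down lst out) := by unfold Spec_up_and_down; infer_instance

-- ===== CLAIM (what is proved, stated in full; the proofs are below) =====
def Claim_equal_up_and_down : Prop := ∀ (lst : List Int), Dom_up_and_down lst → Spec_up_and_down lst (up_and_down lst)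

-- ===== LEMMAS AND PROOFS =====

-- A's counter pair, started at (p, i), ends at (p + #evens, i + #odds).
theorem up_and_down_fold_counts (lst : List Int) (p i : Int) :
    lst.foldl
      (fun (pi : Int × Int) x =>
        if PySem.Int.mod x 2 = 0 then (pi.1 + 1, pi.2) else (pi.1, pi.2 + 1))
      (p, i)
    = (p + ((lst.filter (fun x => PySem.Int.mod x 2 = 0)).length : Int),
       i + ((lst.filter (fun x => PySem.Int.mod x 2 ≠ 0)).length : Int)) := by
  induction lst generalizing p i with
  | nil => simp
  | cons x xs ih =>
    simp only [List.foldl_cons, List.filter_cons]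
    by_cases h : PySem.Int.mod x 2 = 0
    · rw [if_pos h, ih, if_pos (by exact decide_eq_true (by exact h)),
          if_neg (by simpa using h)]
      simp only [List.length_cons, Prod.mk.injEq]
      push_cast
      exact ⟨by ring, trivial⟩
    · rw [if_neg h, ih, if_neg (by simpa using h),
          if_pos (by exact decide_eq_true (by exact h))]
      simp only [List.length_cons, Prod.mk.injEq]
      push_cast
      exact ⟨trivial, by ring⟩

-- ===== VERDICT (by name: the statement is the Claim_ definition above) =====
theorem up_and_down_spec : Claim_equal_up_and_down := by
  intro lst _
  unfold Spec_up_and_down up_and_down up_and_down_alt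
  have hfold := PySem.List.foldl_pyRange_pyGetD' (xs := lst) (d := 0)
    (f := fun (pi : Int × Int) v =>
      if PySem.Int.mod v 2 = 0 then (pi.1 + 1, pi.2) else (pi.1, pi.2 + 1))
    (init := ((0 : Int), (0 : Int))) (a := 0) (by norm_num)
  simp only [Int.toNat_zero, List.drop_zero] at hfold
  simp only [hfold, up_and_down_fold_counts lst 0 0]
  ring
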